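-- pv_equiv track=rewrite | github.com/annabavaresco/pstrentino | historical-data/Functions.py | comp_less_severe
-- ===== SOURCE A (Python) =====
-- def comp_less_severe(triage, t_waiting):
--     '''
--         Takes as input the triage color and the attribute .waiting of an instance of the sclass "Hospital"
--         and outputs the number of patients having a level of priority which is higher than that of the
--         input color.
--     '''
--     col_list = ['orange', 'blue', 'green', 'white']
--     res = 0
--     if triage == 'red':
--         for c in col_list:
--             res += t_waiting[c]
--     elif triage == 'orange':
--         for c in col_list[1:]:
--             res += t_waiting[c]
--     elif triage == 'blue':
--         for c in col_list[2:]: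
--             res += t_waiting[c]
--     elif triage == 'green':
--         res += t_waiting['white']
--
--     return res
-- ===== SOURCE B (Python) =====
-- def comp_less_severe(triage, t_waiting):
--     next_color = {'red': 'orange', 'orange': 'blue', 'blue': 'green', 'green': 'white'}
--     if triage not in next_color:
--         return 0
--     n = next_color[triage]
--     return t_waiting[n] + comp_less_severe(n, t_waiting)
-- ===== Notes on version B (the rewrite author's own statement) =====
-- stated objective: alternative
-- what changed: Replaces A's four explicit branch-and-loop cases with a recursive walk along a successor-color chain: each call looks up the next-lower color and adds its waiting count plus the recursive total for that color.
import Mathlib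
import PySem

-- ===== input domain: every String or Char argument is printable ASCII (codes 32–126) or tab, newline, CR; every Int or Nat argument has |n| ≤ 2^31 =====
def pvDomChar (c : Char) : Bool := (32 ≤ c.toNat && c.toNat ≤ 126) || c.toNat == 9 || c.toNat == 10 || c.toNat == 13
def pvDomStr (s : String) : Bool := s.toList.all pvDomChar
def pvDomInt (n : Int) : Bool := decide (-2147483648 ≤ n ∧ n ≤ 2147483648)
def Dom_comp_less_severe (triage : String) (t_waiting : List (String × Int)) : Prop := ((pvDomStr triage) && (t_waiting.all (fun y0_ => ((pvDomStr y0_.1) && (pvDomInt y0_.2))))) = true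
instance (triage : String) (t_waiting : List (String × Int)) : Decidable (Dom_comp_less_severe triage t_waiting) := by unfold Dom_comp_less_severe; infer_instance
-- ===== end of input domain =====

-- B replaces A's branch-per-color loops by a recursive walk along a successor-color chain (objective: alternative); Pre_ excludes the KeyError inputs (a needed color key missing) on which both programs raise.


-- shared helper: Python's t_waiting[c] on an association list (first match); total here,
-- Pre_ below excludes the KeyError inputs where Python raises
def pvLookup (t : List (String × Int)) (c : String) : Int :=
  (((t.find? (fun p => p.1 == c)).map Prod.snd)).getD 0

-- ===== PORT A =====
def comp_less_severe (triage : String) (t_waiting : List (String × Int)) : Int :=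
  let col_list : List String := ["orange", "blue", "green", "white"]
  let res : Int := 0
  if triage = "red" then
    col_list.foldl (fun r c => r + pvLookup t_waiting c) res
  else if triage = "orange" then
    -- col_list[1:] with a nonnegative literal index = drop 1
    (col_list.drop 1).foldl (fun r c => r + pvLookup t_waiting c) res
  else if triage = "blue" then
    (col_list.drop 2).foldl (fun r c => r + pvLookup t_waiting c) res
  else if triage = "green" then
    res + pvLookup t_waiting "white"
  else
    res

-- ===== PORT B =====
-- Source B's successor dict, as a PySem.Dict literal
def pvNextDict : PySem.Dict String String :=
  PySem.Dict.ofList [("red", "orange"), ("orange", "blue"), ("blue", "green"), ("green", "white")]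

-- rank measure for the termination of the recursive chain walk (proof-side measure only)
def pvRank (c : String) : Nat :=
  if c = "red" then 4 else if c = "orange" then 3 else if c = "blue" then 2
  else if c = "green" then 1 else 0

theorem pvNext_rank_lt (t n : String) (h : pvNextDict.get? t = some n) : pvRank n < pvRank t := by
  by_cases h1 : t = "red"
  · subst h1; rw [show pvNextDict.get? "red" = some "orange" from rfl] at h
    injection h with h'; subst h'; decide
  by_cases h2 : t = "orange"
  · subst h2; rw [show pvNextDict.get? "orange" = some "blue" from rfl] at h
    injection h with h'; subst h'; decide
  by_cases h3 : t = "blue"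
  · subst h3; rw [show pvNextDict.get? "blue" = some "green" from rfl] at h
    injection h with h'; subst h'; decide
  by_cases h4 : t = "green"
  · subst h4; rw [show pvNextDict.get? "green" = some "white" from rfl] at h
    injection h with h'; subst h'; decide
  · exfalso
    simp only [pvNextDict, PySem.Dict.ofList, PySem.Dict.update, PySem.Dict.get?] at h
    simp [PySem.Dict.empty, PySem.Dict.insert] at h
    obtain ⟨a, h⟩ := h
    rcases h with ⟨ht, _⟩ | ⟨_, ⟨ht, _⟩ | ⟨_, ⟨ht, _⟩ | ⟨_, ht, _⟩⟩⟩
    · exact h1 ht.symm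
    · exact h2 ht.symm
    · exact h3 ht.symm
    · exact h4 ht.symm

def comp_less_severe_alt (triage : String) (t_waiting : List (String × Int)) : Int :=
  match h : pvNextDict.get? triage with
  | none => 0     -- 'triage not in next_color'
  | some n => pvLookup t_waiting n + comp_less_severe_alt n t_waiting
termination_by pvRank triage
decreasing_by exact pvNext_rank_lt _ _ h

-- ===== PRECONDITION & SPEC =====
-- keys the Python dict subscript touches for this triage color; Pre_ excludes exactly the
-- inputs on which A (and B) raise KeyError: a needed color key missing from t_waiting
def pvNeeded (triage : String) : List String :=
  if triage = "red" then ["orange", "blue", "green", "white"]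
  else if triage = "orange" then ["blue", "green", "white"]
  else if triage = "blue" then ["green", "white"]
  else if triage = "green" then ["white"]
  else []

def Pre_comp_less_severe (triage : String) (t_waiting : List (String × Int)) : Prop :=
  ∀ c ∈ pvNeeded triage, c ∈ t_waiting.map Prod.fst
instance (triage : String) (t_waiting : List (String × Int)) : Decidable (Pre_comp_less_severe triage t_waiting) := by unfold Pre_comp_less_severe; infer_instance

def pvWitness_comp_less_severe : String × (List (String × Int)) :=
  ("blue", [("green", 3), ("white", 5)])

def Spec_comp_less_severe (triage : String) (t_waiting : List (String × Int)) (out : Int) : Prop := out = comp_less_severe_alt triage t_waiting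
instance (triage : String) (t_waiting : List (String × Int)) (out : Int) : Decidable (Spec_comp_less_severe triage t_waiting out) := by unfold Spec_comp_less_severe; infer_instance

-- ===== CLAIM =====
def Claim_equal_comp_less_severe : Prop := ∀ (triage : String) (t_waiting : List (String × Int)), Dom_comp_less_severe triage t_waiting → Pre_comp_less_severe triage t_waiting → Spec_comp_less_severe triage t_waiting (comp_less_severe triage t_waiting)

-- ===== LEMMAS AND PROOFS =====
theorem pvNext_char (t : String) : pvNextDict.get? t =
    (if t = "red" then some "orange" else if t = "orange" then some "blue"
     else if t = "blue" then some "green" else if t = "green" then some "white" else none) := by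
  have hd : pvNextDict =
      ((((PySem.Dict.empty.insert "red" "orange").insert "orange" "blue").insert
          "blue" "green").insert "green" "white") := by rfl
  rw [hd]
  simp only [PySem.Dict.get?_insert, PySem.Dict.get?_empty]
  split_ifs <;> simp_all

theorem alt_unfold (triage : String) (t : List (String × Int)) :
    comp_less_severe_alt triage t =
      match pvNextDict.get? triage with
      | none => 0
      | some n => pvLookup t n + comp_less_severe_alt n t := by
  rw [comp_less_severe_alt]
  cases hc : pvNextDict.get? triage <;> simp only [hc]

theorem alt_default (triage : String) (t : List (String × Int))
    (h1 : triage ≠ "red") (h2 : triage ≠ "orange") (h3 : triage ≠ "blue")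
    (h4 : triage ≠ "green") : comp_less_severe_alt triage t = 0 := by
  rw [alt_unfold, pvNext_char]
  simp [h1, h2, h3, h4]

-- ===== VERDICT =====
theorem comp_less_severe_spec : Claim_equal_comp_less_severe := by
  intro triage t _ _
  unfold Spec_comp_less_severe comp_less_severe
  have hget_g : pvNextDict.get? "green" = some "white" := by rw [pvNext_char]; rfl
  have hget_b : pvNextDict.get? "blue" = some "green" := by rw [pvNext_char]; rfl
  have hget_o : pvNextDict.get? "orange" = some "blue" := by rw [pvNext_char]; rfl
  have hget_r : pvNextDict.get? "red" = some "orange" := by rw [pvNext_char]; rfl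
  have hw : comp_less_severe_alt "white" t = 0 :=
    alt_default _ _ (by decide) (by decide) (by decide) (by decide)
  have hg : comp_less_severe_alt "green" t = pvLookup t "white" := by
    rw [alt_unfold, hget_g]; simp [hw]
  have hb : comp_less_severe_alt "blue" t = pvLookup t "green" + pvLookup t "white" := by
    rw [alt_unfold, hget_b]; simp [hg]
  have ho : comp_less_severe_alt "orange" t
      = pvLookup t "blue" + pvLookup t "green" + pvLookup t "white" := by
    rw [alt_unfold, hget_o]; simp [hb, add_assoc]
  have hr : comp_less_severe_alt "red" t
      = pvLookup t "orange" + pvLookup t "blue" + pvLookup t "green" + pvLookup t "white" := by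
    rw [alt_unfold, hget_r]; simp [ho, add_assoc]
  by_cases h1 : triage = "red"
  · subst h1; simp [hr]
  by_cases h2 : triage = "orange"
  · subst h2; simp [h1, ho]
  by_cases h3 : triage = "blue"
  · subst h3; simp [h1, h2, hb]
  by_cases h4 : triage = "green"
  · subst h4; simp [h1, h2, h3, hg]
  · simp [h1, h2, h3, h4, alt_default triage t h1 h2 h3 h4]
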